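-- pv_equiv track=rewrite | github.com/chknlittle/switch | src/core/session_runtime/runtime.py | _extract_run_tokens
-- ===== SOURCE A (Python) =====
-- def _extract_run_tokens(engine: str, stats: dict) -> int:
--     """Best-effort: normalize a per-run token count across engines."""
--     if engine == "claude":
--         t = stats.get("tokens_total")
--         return int(t) if isinstance(t, (int, float)) else 0
--
--     # OpenCode emits several categories; treat them as additive.
--     total = 0
--     for k in (
--         "tokens_in",
--         "tokens_out",
--         "tokens_reasoning",
--         "tokens_cache_read",
--         "tokens_cache_write",
--     ):
--         v = stats.get(k)
--         if isinstance(v, (int, float)):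
--             total += int(v)
--     return total
-- ===== SOURCE B (Python) =====
-- _OPENCODE_KEYS = frozenset((
--     "tokens_in",
--     "tokens_out",
--     "tokens_reasoning",
--     "tokens_cache_read",
--     "tokens_cache_write",
-- ))
-- _CLAUDE_KEYS = frozenset(("tokens_total",))
--
--
-- def _extract_run_tokens(engine: str, stats: dict) -> int:
--     """Best-effort: normalize a per-run token count across engines."""
--     wanted = _CLAUDE_KEYS if engine == "claude" else _OPENCODE_KEYS
--     total = 0
--     for k, v in stats.items():
--         if k in wanted and isinstance(v, (int, float)):
--             total += int(v)
--     return total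
-- ===== Notes on version B (the rewrite author's own statement) =====
-- stated objective: alternative
-- what changed: Inverted the traversal: instead of probing a fixed list of keys with stats.get (with an early-return special case for claude), B makes one pass over the dict's own items and accumulates the values whose key lies in the engine's relevant key set.
import Mathlib
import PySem

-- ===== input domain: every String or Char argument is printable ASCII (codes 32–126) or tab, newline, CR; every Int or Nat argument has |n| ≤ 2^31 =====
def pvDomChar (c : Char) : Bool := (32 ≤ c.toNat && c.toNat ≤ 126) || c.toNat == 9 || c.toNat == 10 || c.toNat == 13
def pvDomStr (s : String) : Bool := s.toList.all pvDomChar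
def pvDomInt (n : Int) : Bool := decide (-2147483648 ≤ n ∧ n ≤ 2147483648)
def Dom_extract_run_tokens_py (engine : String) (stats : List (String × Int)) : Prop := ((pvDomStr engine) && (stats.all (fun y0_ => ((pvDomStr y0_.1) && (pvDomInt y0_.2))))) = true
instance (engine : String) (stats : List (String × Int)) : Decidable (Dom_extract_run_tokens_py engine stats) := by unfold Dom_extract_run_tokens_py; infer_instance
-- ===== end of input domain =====

-- B inverts the traversal: instead of probing a fixed key list with stats.get, it scans the
-- dict's own items once, keeping values whose key is in the engine's relevant key set
-- (objective: alternative; the dict argument is modelled as PySem.Dict.ofList, unique keys).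

-- ===== PORT A =====
-- literal port of A: explicit "claude" early return via a single lookup, else a fold
-- accumulating `total` over the five OpenCode keys probed with stats.get (the
-- `isinstance(v, (int, float))` test is always true here since all values are Int,
-- so a found value is always added; a missing key contributes nothing)
def extract_run_tokens_py (engine : String) (stats : List (String × Int)) : Int :=
  if engine = "claude" then
    match (PySem.Dict.ofList stats).get? "tokens_total" with
    | some t => t
    | none => 0
  else
    ["tokens_in", "tokens_out", "tokens_reasoning", "tokens_cache_read",
     "tokens_cache_write"].foldl
      (fun total k =>
        match (PySem.Dict.ofList stats).get? k with
        | some v => total + v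
        | none => total) 0

-- ===== PORT B =====
-- literal port of B: pick the engine's key set, then ONE pass over stats.items(),
-- adding kv.2 when the key is a member of the set (isinstance is always true on Int)
def pvWanted (engine : String) : List String :=
  if engine = "claude" then ["tokens_total"]
  else ["tokens_in", "tokens_out", "tokens_reasoning", "tokens_cache_read",
        "tokens_cache_write"]

def extract_run_tokens_py_alt (engine : String) (stats : List (String × Int)) : Int :=
  (PySem.Dict.ofList stats).items.foldl
    (fun total kv => if (pvWanted engine).contains kv.1 then total + kv.2 else total) 0

-- ===== PRECONDITION & SPEC =====
def Spec_extract_run_tokens_py (engine : String) (stats : List (String × Int)) (out : Int) : Prop := out = extract_run_tokens_py_alt engine stats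
instance (engine : String) (stats : List (String × Int)) (out : Int) : Decidable (Spec_extract_run_tokens_py engine stats out) := by unfold Spec_extract_run_tokens_py; infer_instance

-- ===== CLAIM (what is proved, stated in full; the proofs are below) =====
def Claim_equal_extract_run_tokens_py : Prop := ∀ (engine : String) (stats : List (String × Int)), Dom_extract_run_tokens_py engine stats → Spec_extract_run_tokens_py engine stats (extract_run_tokens_py engine stats)

-- ===== LEMMAS AND PROOFS =====

-- B's item scan is the sum of the values kept by the filter
theorem foldl_if_eq_sum_filter (l : List (String × Int)) (P : String → Bool) (a : Int) :
    l.foldl (fun total kv => if P kv.1 then total + kv.2 else total) a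
      = a + ((l.filter (fun kv => P kv.1)).map Prod.snd).sum := by
  induction l generalizing a with
  | nil => simp
  | cons p rest ih =>
    by_cases h : P p.1 <;> simp [h, ih, add_assoc]

-- A's accumulator fold over a key list is the sum of the per-key getD values
theorem foldl_get_eq_sum_getD (d : PySem.Dict String Int) (ks : List String) (a : Int) :
    ks.foldl (fun total k => match d.get? k with | some v => total + v | none => total) a
      = a + (ks.map (fun k => d.getD k 0)).sum := by
  induction ks generalizing a with
  | nil => simp
  | cons k ks ih =>
    simp only [List.foldl_cons, List.map_cons, List.sum_cons]
    cases h : d.get? k with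
    | none =>
      rw [ih a, PySem.Dict.getD_of_get?_eq_none d 0 h]; ring
    | some v =>
      rw [ih (a + v), PySem.Dict.getD_of_get?_eq_some d 0 h]; ring

-- a key absent from an association list looks up to none
theorem get?_mk_eq_none (l : List (String × Int)) (k : String)
    (h : k ∉ l.map Prod.fst) : (PySem.Dict.mk l).get? k = none := by
  induction l with
  | nil => simp [PySem.Dict.get?]
  | cons p rest ih =>
    simp only [List.map_cons, List.mem_cons, not_or] at h
    rw [PySem.Dict.get?_mk_cons]
    have : (p.1 == k) = false := by simp [h.1, Ne.symm]
    simp [this, ih h.2]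

-- replacing the (unique) a-entry of a nodup key list in a pointwise sum, when g a = 0
theorem sum_map_if_eq (ks : List String) (hk : ks.Nodup) (a : String) (c : Int)
    (g : String → Int) (hg : g a = 0) :
    (ks.map (fun k => if a == k then c else g k)).sum
      = (if ks.contains a then c else 0) + (ks.map g).sum := by
  induction ks with
  | nil => simp
  | cons k ks ih =>
    have hk' : ks.Nodup := hk.of_cons
    by_cases h : a = k
    · subst h
      have hma : a ∉ ks := (List.nodup_cons.mp hk).1
      have hmap : List.map (fun k => if (a == k) = true then c else g k) ks
          = List.map g ks := by
        apply List.map_congr_left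
        intro x hx
        have hne : (a == x) = false := by
          simp only [beq_eq_false_iff_ne]; rintro rfl; exact hma hx
        simp [hne]
      rw [List.map_cons, List.sum_cons, hmap]
      simp [hg]
    · have hne : (a == k) = false := by simp [h]
      have hc : (k :: ks).contains a = ks.contains a := by
        rw [List.contains_cons, hne, Bool.false_or]
      simp only [List.map_cons, List.sum_cons, hne, Bool.false_eq_true, if_false,
        ih hk', hc]
      ring

-- the central bridge: for an association list with distinct keys and a distinct key list,
-- summing the values whose key is wanted equals summing getD over the wanted keys
theorem filter_sum_eq_sum_getD (l : List (String × Int)) (ks : List String)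
    (hl : (l.map Prod.fst).Nodup) (hk : ks.Nodup) :
    ((l.filter (fun kv => ks.contains kv.1)).map Prod.snd).sum
      = (ks.map (fun k => (PySem.Dict.mk l).getD k 0)).sum := by
  induction l with
  | nil =>
    have : ∀ k ∈ ks, (PySem.Dict.mk ([] : List (String × Int))).getD k 0 = 0 := by
      intro k _
      exact PySem.Dict.getD_of_get?_eq_none _ 0 (by simp [PySem.Dict.get?])
    simp [List.map_congr_left this]
  | cons p rest ih =>
    simp only [List.map_cons, List.nodup_cons] at hl
    obtain ⟨hp, hrest⟩ := hl
    have hrest0 : (PySem.Dict.mk rest).getD p.1 0 = 0 :=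
      PySem.Dict.getD_of_get?_eq_none _ 0 (get?_mk_eq_none rest p.1 hp)
    have hmap : ks.map (fun k => (PySem.Dict.mk (p :: rest)).getD k 0)
        = ks.map (fun k => if p.1 == k then p.2 else (PySem.Dict.mk rest).getD k 0) := by
      apply List.map_congr_left
      intro k _
      rw [PySem.Dict.getD_eq_get?_getD, PySem.Dict.get?_mk_cons]
      by_cases h : p.1 == k
      · simp [h]
      · simp [h, ← PySem.Dict.getD_eq_get?_getD]
    rw [hmap, sum_map_if_eq ks hk p.1 p.2 _ hrest0, ← ih hrest]
    by_cases h : p.1 ∈ ks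
    · simp [h]
    · simp [h]

-- ofList produces distinct keys, and mk of its items is itself
theorem nodup_fst_items_ofList (stats : List (String × Int)) :
    ((PySem.Dict.ofList stats).items.map Prod.fst).Nodup := by
  have := PySem.Dict.nodup_keys_ofList (ps := stats)
  simpa [PySem.Dict.keys] using this

-- B's scan over the items of ofList stats equals A's key-probing sum
theorem scan_eq_probe (stats : List (String × Int)) (ks : List String) (hk : ks.Nodup) :
    (PySem.Dict.ofList stats).items.foldl
      (fun total kv => if ks.contains kv.1 then total + kv.2 else total) 0
      = (ks.map (fun k => (PySem.Dict.ofList stats).getD k 0)).sum := by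
  rw [foldl_if_eq_sum_filter, zero_add,
    filter_sum_eq_sum_getD _ ks (nodup_fst_items_ofList stats) hk]

-- ===== VERDICT (by name: the statement is the Claim_ definition above) =====
theorem extract_run_tokens_py_spec : Claim_equal_extract_run_tokens_py := by
  intro engine stats _
  unfold Spec_extract_run_tokens_py extract_run_tokens_py extract_run_tokens_py_alt pvWanted
  by_cases h : engine = "claude"
  · subst h
    rw [if_pos rfl, if_pos rfl]
    rw [scan_eq_probe stats ["tokens_total"] (by decide)]
    cases hg : (PySem.Dict.ofList stats).get? "tokens_total" with
    | none => simp [PySem.Dict.getD_eq_get?_getD, hg]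
    | some t => simp [PySem.Dict.getD_eq_get?_getD, hg]
  · simp only [if_neg h]
    rw [scan_eq_probe stats _ (by decide), foldl_get_eq_sum_getD, zero_add]
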